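-- pv_equiv track=rewrite | github.com/djeastm/Spanish_Corpus_Analysis_Project | DE/C-Or-DiAL/script_archive/process_c-or-dial_corpus_with_metadata.py | create_breakdown
-- ===== SOURCE A (Python) =====
-- def create_breakdown(text_id, dictionary):
--     sorted_PoS = sorted(dictionary.items())
--     breakdown = ''
--     for roots in list(sorted_PoS):
--         code = roots[0]
--         sorted_roots = sorted(roots[1].items())
--         for root in list(sorted_roots):
--             breakdown += code+" "+root[0]+" "+str(root[1])+" "+text_id+"\n"
--     return breakdown
-- ===== SOURCE B (Python) =====
-- def create_breakdown(text_id, dictionary):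
--     rows = [(code, root, count)
--             for code, roots in dictionary.items()
--             for root, count in roots.items()]
--     rows.sort(key=lambda r: (r[0], r[1]))
--     return ''.join(f"{code} {root} {count} {text_id}\n" for code, root, count in rows)
-- ===== Notes on version B (the rewrite author's own statement) =====
-- stated objective: alternative
-- what changed: Replaces A's nested decomposition (sort outer dict, then sort each inner dict inside the loop, concatenating with +=) by one flattening pass into (code, root, count) rows, a single global sort by (code, root), and one ''.join of the formatted lines.
import Mathlib
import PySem

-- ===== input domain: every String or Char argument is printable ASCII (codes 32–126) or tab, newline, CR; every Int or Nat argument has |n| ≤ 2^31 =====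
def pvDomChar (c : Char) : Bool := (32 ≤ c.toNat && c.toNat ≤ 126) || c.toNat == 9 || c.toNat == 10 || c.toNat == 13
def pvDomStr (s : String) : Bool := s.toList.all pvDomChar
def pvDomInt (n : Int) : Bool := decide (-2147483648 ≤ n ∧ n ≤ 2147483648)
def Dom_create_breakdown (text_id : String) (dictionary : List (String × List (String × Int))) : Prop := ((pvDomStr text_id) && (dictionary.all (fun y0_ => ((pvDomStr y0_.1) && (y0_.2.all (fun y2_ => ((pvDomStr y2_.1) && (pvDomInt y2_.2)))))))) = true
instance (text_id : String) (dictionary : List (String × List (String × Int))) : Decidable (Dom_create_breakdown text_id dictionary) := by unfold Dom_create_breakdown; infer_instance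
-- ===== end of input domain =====

-- B replaces A's nested sort-outer-then-sort-each-inner loops by flattening once and doing ONE global sort
-- of (code, root) rows, then joining the formatted lines (objective: alternative decomposition, same result).

-- ===== PORT A =====
-- Python dict keys are unique, so sorted(d.items()) never compares the second components:
-- it is exactly the stable sort by the key (first component), which is how it is ported here.
def create_breakdown (text_id : String) (dictionary : List (String × List (String × Int))) : String :=
  let sorted_PoS := PySem.List.sorted dictionary (fun kv => kv.1) false
  sorted_PoS.foldl (fun breakdown roots =>
    let code := roots.1
    let sorted_roots := PySem.List.sorted roots.2 (fun kv => kv.1) false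
    sorted_roots.foldl (fun breakdown root =>
      breakdown ++ code ++ " " ++ root.1 ++ " " ++ PySem.Int.toStr root.2 ++ " " ++ text_id ++ "\n")
      breakdown) ""

-- ===== PORT B =====
def create_breakdown_alt (text_id : String) (dictionary : List (String × List (String × Int))) : String :=
  let rows := dictionary.flatMap (fun g => g.2.map (fun rc => (g.1, rc.1, rc.2)))
  let srows := PySem.List.sorted2 rows (fun r => r.1) (fun r => r.2.1) false
  PySem.Str.join "" (srows.map (fun r =>
    r.1 ++ " " ++ r.2.1 ++ " " ++ PySem.Int.toStr r.2.2 ++ " " ++ text_id ++ "\n"))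

-- ===== PRECONDITION & SPEC =====
-- Pre_ excludes association lists with duplicate outer keys or duplicate keys inside an inner list:
-- such lists represent no Python dict (dict keys are unique), so A is never called on them.
def Pre_create_breakdown (text_id : String) (dictionary : List (String × List (String × Int))) : Prop :=
  (dictionary.map Prod.fst).Nodup ∧ ∀ g ∈ dictionary, (g.2.map Prod.fst).Nodup
instance (text_id : String) (dictionary : List (String × List (String × Int))) : Decidable (Pre_create_breakdown text_id dictionary) := by unfold Pre_create_breakdown; infer_instance

def pvWitness_create_breakdown : String × (List (String × List (String × Int))) :=
  ("T1", [("N", [("casa", 2), ("sol", 1)]), ("V", [("ir", 3)])])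

def Spec_create_breakdown (text_id : String) (dictionary : List (String × List (String × Int))) (out : String) : Prop := out = create_breakdown_alt text_id dictionary
instance (text_id : String) (dictionary : List (String × List (String × Int))) (out : String) : Decidable (Spec_create_breakdown text_id dictionary out) := by unfold Spec_create_breakdown; infer_instance

-- ===== CLAIM (what is proved, stated in full; the proofs are below) =====
def Claim_equal_create_breakdown : Prop := ∀ (text_id : String) (dictionary : List (String × List (String × Int))), Dom_create_breakdown text_id dictionary → Pre_create_breakdown text_id dictionary → Spec_create_breakdown text_id dictionary (create_breakdown text_id dictionary)

-- ===== LEMMAS AND PROOFS =====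

-- the formatted line of one flat row
def pvLine (text_id : String) (r : String × String × Int) : String :=
  r.1 ++ " " ++ r.2.1 ++ " " ++ PySem.Int.toStr r.2.2 ++ " " ++ text_id ++ "\n"

-- A's flat row list: outer sorted by code, inner sorted by root
def pvRowsA (dictionary : List (String × List (String × Int))) : List (String × String × Int) :=
  (PySem.List.sorted dictionary (fun kv => kv.1) false).flatMap
    (fun g => (PySem.List.sorted g.2 (fun kv => kv.1) false).map (fun rc => (g.1, rc.1, rc.2)))

theorem pvFold {α : Type} (f : α → String) (l : List α) (acc : String) :
    (l.foldl (fun b x => b ++ f x) acc).toList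
      = acc.toList ++ (l.map (fun x => (f x).toList)).flatten := by
  induction l generalizing acc with
  | nil => simp
  | cons x t ih => simp [ih, String.toList_append]

theorem pvJoinChars (ps : List (List Char)) :
    PySem.Chars.join [] ps = ps.flatten := by
  induction ps with
  | nil => simp [PySem.Chars.join, List.intercalate]
  | cons p t ih =>
    cases t with
    | nil => simp [PySem.Chars.join, List.intercalate]
    | cons q u => simpa [PySem.Chars.join_cons_cons] using ih

theorem pvJoin (ls : List String) :
    (PySem.Str.join "" ls).toList = (ls.map String.toList).flatten := by
  rw [PySem.Str.toList_join]
  simpa using pvJoinChars (ls.map String.toList)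

theorem pvFoldA (text_id : String) (gs : List (String × List (String × Int))) (acc : String) :
    (gs.foldl (fun breakdown roots =>
        (PySem.List.sorted roots.2 (fun kv => kv.1) false).foldl
          (fun breakdown root =>
            breakdown ++ roots.1 ++ " " ++ root.1 ++ " " ++ PySem.Int.toStr root.2 ++ " " ++ text_id ++ "\n")
          breakdown) acc).toList
      = acc.toList
        ++ ((gs.flatMap (fun g => (PySem.List.sorted g.2 (fun kv => kv.1) false).map
              (fun rc => (g.1, rc.1, rc.2)))).map (fun r => (pvLine text_id r).toList)).flatten := by
  induction gs generalizing acc with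
  | nil => simp
  | cons g t ih =>
    have hbody : (fun (b : String) (root : String × Int) =>
        b ++ g.1 ++ " " ++ root.1 ++ " " ++ PySem.Int.toStr root.2 ++ " " ++ text_id ++ "\n")
        = fun b root => b ++ pvLine text_id (g.1, root.1, root.2) := by
      funext b root
      simp [pvLine, String.append_assoc]
    simp only [List.foldl_cons, List.flatMap_cons, List.map_append, List.flatten_append, ih, hbody,
      pvFold (fun root : String × Int => pvLine text_id (g.1, root.1, root.2))]
    simp [List.map_map, Function.comp_def]

-- sorted2 with two keys IS sorted with the lexicographic tuple key
theorem pvSorted2Lex {α : Type} (xs : List α) (k1 k2 : α → String) :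
    PySem.List.sorted2 xs k1 k2 false
      = PySem.List.sorted xs (fun x => toLex (k1 x, k2 x)) false := by
  rw [PySem.List.sorted_eq_foldl_insertBy]
  show xs.foldl (fun acc x => PySem.List.insertBy _ x acc) [] = _
  have h : (fun a b => decide (k1 a < k1 b) || (!decide (k1 b < k1 a) && decide (k2 a < k2 b)))
      = fun a b => decide ((fun x => toLex (k1 x, k2 x)) a < (fun x => toLex (k1 x, k2 x)) b) := by
    funext a b
    rcases lt_trichotomy (k1 a) (k1 b) with h1 | h1 | h1
    · simp [Prod.Lex.toLex_lt_toLex, h1, asymm h1]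
    · simp [Prod.Lex.toLex_lt_toLex, h1]
    · simp [Prod.Lex.toLex_lt_toLex, h1, asymm h1, h1.ne']
  simp only [if_neg (by decide : ¬ (false = true))]
  rw [h]

theorem pvPairwiseFlat (gs : List (String × List (String × Int)))
    (h1 : gs.Pairwise (fun a b => a.1 < b.1))
    (h2 : ∀ g ∈ gs, g.2.Pairwise (fun a b : String × Int => a.1 < b.1)) :
    (gs.flatMap (fun g => g.2.map (fun rc => (g.1, rc.1, rc.2)))).Pairwise
      (fun a b : String × String × Int => toLex (a.1, a.2.1) < toLex (b.1, b.2.1)) := by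
  induction gs with
  | nil => simp
  | cons g t ih =>
    rw [List.flatMap_cons, List.pairwise_append]
    refine ⟨?_, ih (List.pairwise_cons.mp h1).2 (fun g' hg' => h2 g' (List.mem_cons_of_mem _ hg')), ?_⟩
    · rw [List.pairwise_map]
      exact (h2 g (List.mem_cons_self)).imp (fun hab => by
        simp [Prod.Lex.toLex_lt_toLex, hab])
    · intro a ha b hb
      obtain ⟨ra, -, rfl⟩ := List.mem_map.mp ha
      obtain ⟨g', hg', hbm⟩ := List.mem_flatMap.mp hb
      obtain ⟨rb, -, rfl⟩ := List.mem_map.mp hbm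
      have : g.1 < g'.1 := (List.pairwise_cons.mp h1).1 g' hg'
      simp [Prod.Lex.toLex_lt_toLex, this]

-- the nodup+sorted list is strictly increasing in its keys
theorem pvSortedStrict {β : Type} (l : List (String × β))
    (hnd : (l.map Prod.fst).Nodup) :
    (PySem.List.sorted l (fun kv => kv.1) false).Pairwise
      (fun a b => a.1 < b.1) := by
  have hperm : (PySem.List.sorted l (fun kv => kv.1) false).Perm l :=
    PySem.List.sorted_perm l _ _
  have hnd' : ((PySem.List.sorted l (fun kv => kv.1) false).map Prod.fst).Nodup :=
    (hperm.map Prod.fst).nodup_iff.mpr hnd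
  have hle : (PySem.List.sorted l (fun kv => kv.1) false).Pairwise
      (fun a b => a.1 ≤ b.1) := PySem.List.sorted_pairwise l _
  have hne : (PySem.List.sorted l (fun kv => kv.1) false).Pairwise
      (fun a b => a.1 ≠ b.1) := List.pairwise_map.mp hnd'
  exact (hle.and hne).imp (fun ⟨hab, hne⟩ => lt_of_le_of_ne hab hne)

theorem pvRowsAChar (dictionary : List (String × List (String × Int)))
    (hpre : Pre_create_breakdown "" dictionary) :
    PySem.List.sorted2
        (dictionary.flatMap (fun g => g.2.map (fun rc => (g.1, rc.1, rc.2))))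
        (fun r => r.1) (fun r => r.2.1) false
      = pvRowsA dictionary := by
  rw [pvSorted2Lex]
  apply PySem.List.sorted_eq_of_perm_of_pairwise_lt
  · -- pvRowsA is a permutation of the unsorted flat rows
    exact List.Perm.flatMap (PySem.List.sorted_perm dictionary _ _)
      (fun g _ => (PySem.List.sorted_perm g.2 _ _).map _)
  · -- and it is strictly increasing in the (code, root) key
    have houter : (PySem.List.sorted dictionary (fun kv => kv.1) false).Pairwise
        (fun a b => a.1 < b.1) := pvSortedStrict dictionary hpre.1
    have hinner : ∀ g ∈ PySem.List.sorted dictionary (fun kv => kv.1) false,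
        (PySem.List.sorted g.2 (fun kv => kv.1) false).Pairwise
          (fun a b : String × Int => a.1 < b.1) := by
      intro g hg
      exact pvSortedStrict g.2 (hpre.2 g ((PySem.List.mem_sorted dictionary _ false g).mp hg))
    have := pvPairwiseFlat
      ((PySem.List.sorted dictionary (fun kv => kv.1) false).map
        (fun g => (g.1, PySem.List.sorted g.2 (fun kv => kv.1) false)))
      (by rw [List.pairwise_map]; exact houter)
      (by
        intro g' hg'
        obtain ⟨g, hg, rfl⟩ := List.mem_map.mp hg'
        exact hinner g hg)
    simpa [pvRowsA, List.flatMap_map] using this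

-- ===== VERDICT (by name: the statement is the Claim_ definition above) =====
theorem create_breakdown_spec : Claim_equal_create_breakdown := by
  intro text_id dictionary _ hpre
  unfold Spec_create_breakdown
  apply String.toList_inj.mp
  have hpre' : Pre_create_breakdown "" dictionary := hpre
  have hrows := pvRowsAChar dictionary hpre'
  show (create_breakdown text_id dictionary).toList = (create_breakdown_alt text_id dictionary).toList
  rw [create_breakdown, create_breakdown_alt]
  simp only []
  rw [hrows, pvJoin, pvFoldA text_id]
  simp [pvRowsA, pvLine, List.map_map, Function.comp_def]
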